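-- pv_equiv track=rewrite | github.com/abovenormal/algoStudy | 장석우/오프라인/2024카카오LV1_가장많이받은선물.py | solution
-- ===== SOURCE A (Python) =====
-- def solution(friends, gifts):
--     fdict = dict()
--     for i, friend in enumerate(friends):
--         fdict[friend] = i
--     n = len(friends)
--     graph = [[0] * n for _ in range(n)]
--     gidxs = [[0, 0] for _ in range(n)]
--
--     for gift in gifts:
--         a, b = gift.split(' ')
--         aidx, bidx = fdict[a], fdict[b]
--         graph[aidx][bidx] += 1
--         gidxs[aidx][0] += 1
--         gidxs[bidx][1] += 1
--
--     for gidx in gidxs: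
--         gidx.append(gidx[0] - gidx[1])
--
--     answer = 0
--     for friend in friends:
--         cnt = 0
--         i = fdict[friend]
--         for j in range(n):
--             if i == j: continue
--             i_to_j = graph[i][j]
--             j_to_i = graph[j][i]
--             if i_to_j > j_to_i: cnt += 1
--             if i_to_j == j_to_i:
--                 i_gidx = gidxs[i][2]
--                 j_gidx = gidxs[j][2]
--                 if i_gidx > j_gidx: cnt += 1
--         answer = max(answer, cnt)
--     return answer
-- ===== SOURCE B (Python) =====
-- def solution(friends, gifts):
--     n = len(friends)
--     idx = {f: i for i, f in enumerate(friends)}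
--     direct = {}
--     diff = [0] * n
--     for gift in gifts:
--         a, b = gift.split(' ')
--         ai, bi = idx[a], idx[b]
--         direct[(ai, bi)] = direct.get((ai, bi), 0) + 1
--         diff[ai] += 1
--         diff[bi] -= 1
--     # baseline: wins a friend would score if every pair were decided by net score
--     # alone = number of friends with a strictly smaller net score, read off one sort
--     first = {}
--     for pos, v in enumerate(sorted(diff)):
--         if v not in first:
--             first[v] = pos
--     wins = [first[d] for d in diff]
--     # correct only the (few) pairs that actually exchanged gifts
--     for i, j in {(min(a, b), max(a, b)) for a, b in direct}:
--         cij, cji = direct.get((i, j), 0), direct.get((j, i), 0)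
--         if diff[i] > diff[j]:
--             wins[i] -= 1
--         elif diff[j] > diff[i]:
--             wins[j] -= 1
--         if cij > cji or (cij == cji and diff[i] > diff[j]):
--             wins[i] += 1
--         elif cji > cij or (cij == cji and diff[j] > diff[i]):
--             wins[j] += 1
--     return max(wins, default=0)
-- ===== Notes on version B (the rewrite author's own statement) =====
-- stated objective: alternative
-- what changed: Replaces A's dense n*n matrix plus a full pairwise rescan per friend by a different algorithm: one sort of the net gift scores yields each friend's baseline wins (the first-occurrence position of its net score in the sorted list = number of strictly smaller scores), and a sparse correction pass over only the pairs that actually exchanged gifts fixes the few pairs where direct counts override the net-score comparison. …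
import Mathlib
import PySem

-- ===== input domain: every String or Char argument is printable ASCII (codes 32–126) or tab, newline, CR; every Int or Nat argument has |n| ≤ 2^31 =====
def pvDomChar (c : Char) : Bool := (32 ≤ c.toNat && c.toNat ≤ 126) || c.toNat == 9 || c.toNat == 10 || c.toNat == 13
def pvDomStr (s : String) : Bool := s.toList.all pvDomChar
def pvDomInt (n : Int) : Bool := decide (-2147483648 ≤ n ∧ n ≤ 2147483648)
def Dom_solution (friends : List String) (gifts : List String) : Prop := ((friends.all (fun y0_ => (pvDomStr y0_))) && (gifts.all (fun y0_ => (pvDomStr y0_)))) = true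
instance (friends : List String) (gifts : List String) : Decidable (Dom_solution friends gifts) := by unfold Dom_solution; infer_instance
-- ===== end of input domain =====

-- B replaces A's dense n×n matrix and full pairwise rescan by one sort of the net gift scores
-- (baseline wins = strictly-smaller count, read off first-occurrence positions in the sorted list)
-- plus a sparse correction pass over only the pairs that actually exchanged gifts (objective: alternative).

-- Shared helper: the name → index dict. A builds it with an explicit enumerate loop, B with the dict
-- comprehension {f: i for i, f in enumerate(friends)} — both are exactly this fold (enumerate indices
-- are nonnegative, so they are stored as Nat; exact).
def buildIdx (friends : List String) : PySem.Dict String Nat :=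
  (friends.zipIdx).foldl (fun d p => d.insert p.1 p.2) (PySem.Dict.empty)

-- ===== PORT A =====
-- One iteration of A's gift loop.  `a, b = gift.split(' ')` raises unless the split has exactly two
-- parts, and `fdict[a]` raises KeyError on an unknown name; both raising cases are outside Pre_
-- (the port leaves the state unchanged there).
def giftStepA (fdict : PySem.Dict String Nat) (st : List (List Int) × List (List Int))
    (gift : String) : List (List Int) × List (List Int) :=
  match PySem.Str.split? gift " " with
  | some [a, b] =>
    match fdict.get? a, fdict.get? b with
    | some aidx, some bidx =>
      let graph := st.1.set aidx ((st.1.getD aidx []).set bidx ((st.1.getD aidx []).getD bidx 0 + 1))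
      let gidxs := st.2.set aidx ((st.2.getD aidx []).set 0 ((st.2.getD aidx []).getD 0 0 + 1))
      let gidxs := gidxs.set bidx ((gidxs.getD bidx []).set 1 ((gidxs.getD bidx []).getD 1 0 + 1))
      (graph, gidxs)
    | _, _ => st
  | _ => st

-- A's inner `for j in range(n)` loop computing cnt for friend index i (range(n) indices are 0..n-1 : Nat; exact).
def cntLoopA (graph gidxs : List (List Int)) (n i : Nat) : Int :=
  (List.range n).foldl (fun cnt j =>
    if i = j then cnt
    else
      let i_to_j := (graph.getD i []).getD j 0
      let j_to_i := (graph.getD j []).getD i 0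
      let cnt := if i_to_j > j_to_i then cnt + 1 else cnt
      if i_to_j = j_to_i then
        if (gidxs.getD i []).getD 2 0 > (gidxs.getD j []).getD 2 0 then cnt + 1 else cnt
      else cnt) 0

def solution (friends : List String) (gifts : List String) : Int :=
  let fdict := buildIdx friends
  let n := friends.length
  let st := gifts.foldl (giftStepA fdict)
    (List.replicate n (List.replicate n (0 : Int)), List.replicate n [0, 0])
  let graph := st.1
  -- `for gidx in gidxs: gidx.append(gidx[0] - gidx[1])`
  let gidxs := st.2.map (fun g => g ++ [g.getD 0 0 - g.getD 1 0])
  -- `fdict[friend]` never raises here: every iterated friend is a key of fdict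
  friends.foldl (fun answer friend =>
    max answer (cntLoopA graph gidxs n (fdict.getD friend 0))) 0

-- ===== PORT B =====
-- One iteration of B's gift loop: sparse direct-count dict + net-score list (same raising
-- corners as A, outside Pre_; state unchanged there).
def giftStepB (idx : PySem.Dict String Nat)
    (st : PySem.Dict (Nat × Nat) Int × List Int)
    (gift : String) : PySem.Dict (Nat × Nat) Int × List Int :=
  match PySem.Str.split? gift " " with
  | some [a, b] =>
    match idx.get? a, idx.get? b with
    | some ai, some bi =>
      let diff := st.2.set ai (st.2.getD ai 0 + 1)
      (st.1.insert (ai, bi) (st.1.getD (ai, bi) 0 + 1),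
       diff.set bi (diff.getD bi 0 - 1))
    | _, _ => st
  | _ => st

-- `for pos, v in enumerate(sorted(diff)):  if v not in first: first[v] = pos`
def firstDict (s : List Int) : PySem.Dict Int Nat :=
  s.zipIdx.foldl (fun d p => if d.contains p.1 then d else d.insert p.1 p.2) PySem.Dict.empty

-- B's correction body for one pair (i, j) that exchanged gifts: retract the net-score credit,
-- re-award by direct counts with net-score tie-break.
def corrStep (direct : PySem.Dict (Nat × Nat) Int) (diff : List Int)
    (w : List Int) (p : Nat × Nat) : List Int :=
  let i := p.1
  let j := p.2
  let cij := direct.getD (i, j) 0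
  let cji := direct.getD (j, i) 0
  let w :=
    if diff.getD j 0 < diff.getD i 0 then w.set i (w.getD i 0 - 1)
    else if diff.getD i 0 < diff.getD j 0 then w.set j (w.getD j 0 - 1)
    else w
  if cji < cij ∨ (cij = cji ∧ diff.getD j 0 < diff.getD i 0) then w.set i (w.getD i 0 + 1)
  else if cij < cji ∨ (cij = cji ∧ diff.getD i 0 < diff.getD j 0) then w.set j (w.getD j 0 + 1)
  else w

def solution_alt (friends : List String) (gifts : List String) : Int :=
  let idx := buildIdx friends
  let n := friends.length
  let st := gifts.foldl (giftStepB idx)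
    ((PySem.Dict.empty : PySem.Dict (Nat × Nat) Int), List.replicate n (0 : Int))
  let direct := st.1
  let diff := st.2
  let first := firstDict (PySem.List.sorted diff (fun x => x) false)
  -- `wins = [first[d] for d in diff]`: every d in diff is a key of first (it occurs in sorted(diff)),
  -- so first[d] never raises; ported as getD with default 0
  let wins := diff.map (fun v => ((first.getD v 0 : Nat) : Int))
  -- `{(min(a, b), max(a, b)) for a, b in direct}`: the corrections commute (each adds/subtracts on
  -- distinct slots), so Python's hash iteration order cannot affect the result; ported in insertion order
  let pairs := PySem.Set.ofList (direct.keys.map (fun p => (min p.1 p.2, max p.1 p.2)))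
  let wins := pairs.foldl (corrStep direct diff) wins
  PySem.List.maxD wins (fun x => x) 0

-- ===== PRECONDITION & SPEC =====
-- Pre_ excludes (a) inputs on which A raises: a gift that does not split on ' ' into exactly two
-- parts (unpacking ValueError) or mentions a name not in friends (KeyError); and (b) friends lists
-- with duplicate names combined with a nonempty gift list, on which A still returns but the
-- dict-overwrite leaves ghost indices whose accidental score only A's per-friend max ignores —
-- a corner no caller of this Kakao task specifies (with no gifts the corner is harmless and kept).
def Pre_solution (friends : List String) (gifts : List String) : Prop :=
  (gifts = [] ∨ friends.Nodup) ∧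
  ∀ gift ∈ gifts, ((PySem.Str.split? gift " ").getD []).length = 2 ∧
    ∀ p ∈ (PySem.Str.split? gift " ").getD [], p ∈ friends
instance (friends : List String) (gifts : List String) : Decidable (Pre_solution friends gifts) := by
  unfold Pre_solution; infer_instance

def pvWitness_solution : List String × List String := (["muzi", "ryan", "frodo"], ["muzi frodo", "ryan muzi", "muzi frodo"])

def Spec_solution (friends : List String) (gifts : List String) (out : Int) : Prop :=
  out = solution_alt friends gifts
instance (friends : List String) (gifts : List String) (out : Int) : Decidable (Spec_solution friends gifts out) := by
  unfold Spec_solution; infer_instance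

-- ===== CLAIM (what is proved, stated in full; the proofs are below) =====
def Claim_equal_solution : Prop := ∀ (friends : List String) (gifts : List String), Dom_solution friends gifts → Pre_solution friends gifts → Spec_solution friends gifts (solution friends gifts)

-- ===== LEMMAS AND PROOFS =====

-- i beats j outright: strictly more direct gifts, or a tie on direct gifts and a strictly larger net score.
def trueWin (d : PySem.Dict (Nat × Nat) Int) (diff : List Int) (i j : Nat) : Bool :=
  decide (d.getD (j, i) 0 < d.getD (i, j) 0 ∨
    (d.getD (i, j) 0 = d.getD (j, i) 0 ∧ diff.getD j 0 < diff.getD i 0))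

-- i beats j on net score alone
def diffWin (diff : List Int) (i j : Nat) : Bool := decide (diff.getD j 0 < diff.getD i 0)

-- which index (if any) pair p credits under the true rule / under the net-score-only rule
def tCred (d : PySem.Dict (Nat × Nat) Int) (diff : List Int) (p : Nat × Nat) : Option Nat :=
  if d.getD (p.2, p.1) 0 < d.getD (p.1, p.2) 0 ∨
      (d.getD (p.1, p.2) 0 = d.getD (p.2, p.1) 0 ∧ diff.getD p.2 0 < diff.getD p.1 0) then some p.1
  else if d.getD (p.1, p.2) 0 < d.getD (p.2, p.1) 0 ∨
      (d.getD (p.1, p.2) 0 = d.getD (p.2, p.1) 0 ∧ diff.getD p.1 0 < diff.getD p.2 0) then some p.2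
  else none

def dCred (diff : List Int) (p : Nat × Nat) : Option Nat :=
  if diff.getD p.2 0 < diff.getD p.1 0 then some p.1
  else if diff.getD p.1 0 < diff.getD p.2 0 then some p.2
  else none

-- net effect of pair p's correction on slot x
def delta (d : PySem.Dict (Nat × Nat) Int) (diff : List Int) (x : Nat) (p : Nat × Nat) : Int :=
  (if tCred d diff p = some x then 1 else 0) - (if dCred diff p = some x then 1 else 0)

def upd (w : List Int) (o : Option Nat) (v : Int) : List Int :=
  match o with
  | some t => w.set t (w.getD t 0 + v)
  | none => w

lemma getD_set_self {α : Type} (l : List α) (a : Nat) (v d : α) (h : a < l.length) :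
    (l.set a v).getD a d = v := by
  simp [List.getD_eq_getElem?_getD, h]

lemma getD_set_ne {α : Type} (l : List α) (a i : Nat) (v d : α) (h : a ≠ i) :
    (l.set a v).getD i d = l.getD i d := by
  simp [List.getD_eq_getElem?_getD, h]

lemma getD_set_split {α : Type} (l : List α) (a i : Nat) (v d : α) (h : a < l.length) :
    (l.set a v).getD i d = if i = a then v else l.getD i d := by
  split_ifs with hia
  · subst hia; exact getD_set_self l i v d h
  · exact getD_set_ne l a i v d (fun he => hia he.symm)

lemma getD_replicate' {α : Type} (n i : Nat) (v d : α) :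
    (List.replicate n v).getD i d = if i < n then v else d := by
  simp [List.getD_eq_getElem?_getD, List.getElem?_replicate]; split_ifs <;> rfl

lemma buildIdx_aux_lt (l : List String) : ∀ (s : Nat) (d : PySem.Dict String Nat) (a : String) (i : Nat)
    (_ : ((l.zipIdx s).foldl (fun d p => d.insert p.1 p.2) d).get? a = some i),
    d.get? a = some i ∨ (s ≤ i ∧ i < s + l.length) := by
  induction l with
  | nil => intro s d a i h; simp at h; exact Or.inl h
  | cons x t ih =>
    intro s d a i h
    rw [List.zipIdx_cons, List.foldl_cons] at h
    rcases ih (s+1) (d.insert x s) a i h with h' | h'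
    · rw [PySem.Dict.get?_insert] at h'
      by_cases hax : a = x
      · simp [hax] at h'
        right
        constructor
        · omega
        · simp; omega
      · simp [hax] at h'; exact Or.inl h'
    · right; simp; omega

lemma buildIdx_aux_notmem (l : List String) : ∀ (s : Nat) (d : PySem.Dict String Nat) (a : String)
    (_ : a ∉ l),
    ((l.zipIdx s).foldl (fun d p => d.insert p.1 p.2) d).get? a = d.get? a := by
  induction l with
  | nil => intro s d a _; rfl
  | cons x t ih =>
    intro s d a h
    rw [List.zipIdx_cons, List.foldl_cons, ih (s+1) _ a (by simp at h; exact h.2),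
      PySem.Dict.get?_insert_of_ne _ _ (by simp at h; exact h.1)]

lemma buildIdx_aux_self (l : List String) : ∀ (s : Nat) (d : PySem.Dict String Nat)
    (_ : l.Nodup) (k : Nat) (hk : k < l.length),
    ((l.zipIdx s).foldl (fun d p => d.insert p.1 p.2) d).get? l[k] = some (s + k) := by
  induction l with
  | nil => intro s d _ k hk; simp at hk
  | cons x t ih =>
    intro s d hnd k hk
    rw [List.zipIdx_cons, List.foldl_cons]
    rcases List.nodup_cons.mp hnd with ⟨hx, hnt⟩
    cases k with
    | zero =>
      simpa [buildIdx_aux_notmem t (s+1) _ x hx] using PySem.Dict.get?_insert_self d x s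
    | succ k =>
      have := ih (s+1) (d.insert x s) hnt k (by simpa using hk)
      simpa [Nat.add_assoc, Nat.add_comm 1 k] using this

lemma buildIdx_get_lt (friends : List String) (a : String) (i : Nat)
    (h : (buildIdx friends).get? a = some i) : i < friends.length := by
  rcases buildIdx_aux_lt friends 0 PySem.Dict.empty a i h with h' | h'
  · rw [PySem.Dict.get?_empty] at h'; cases h'
  · omega

lemma buildIdx_getD_self (friends : List String) (hnd : friends.Nodup) (k : Nat)
    (hk : k < friends.length) : (buildIdx friends).getD friends[k] 0 = k := by
  rw [PySem.Dict.getD_eq_get?_getD]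
  have h := buildIdx_aux_self friends 0 PySem.Dict.empty hnd k hk
  unfold buildIdx
  rw [h]
  simp

-- the invariant tying A's matrix state to B's sparse state through the gift loop
structure SyncInv (n : Nat) (g gx : List (List Int)) (d : PySem.Dict (Nat × Nat) Int)
    (diff : List Int) : Prop where
  glen : g.length = n
  gxlen : gx.length = n
  dflen : diff.length = n
  rowlen : ∀ i < n, (g.getD i []).length = n
  gxrowlen : ∀ i < n, (gx.getD i []).length = 2
  graph_eq : ∀ i < n, ∀ j < n, (g.getD i []).getD j 0 = d.getD (i, j) 0
  diff_eq : ∀ i < n, (gx.getD i []).getD 0 0 - (gx.getD i []).getD 1 0 = diff.getD i 0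
  keys_lt : ∀ p : Nat × Nat, d.contains p = true → p.1 < n ∧ p.2 < n

lemma inv_init (n : Nat) :
    SyncInv n (List.replicate n (List.replicate n (0 : Int))) (List.replicate n [0, 0])
      (PySem.Dict.empty) (List.replicate n (0 : Int)) := by
  constructor <;> intros <;>
    simp_all [PySem.Dict.getD_eq_get?_getD, PySem.Dict.get?_empty,
      PySem.Dict.contains_empty]

lemma inv_step (n : Nat) (fdict : PySem.Dict String Nat)
    (hf : ∀ a i, fdict.get? a = some i → i < n)
    (g gx : List (List Int)) (d : PySem.Dict (Nat × Nat) Int) (diff : List Int)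
    (inv : SyncInv n g gx d diff) (gift : String) :
    SyncInv n (giftStepA fdict (g, gx) gift).1 (giftStepA fdict (g, gx) gift).2
      (giftStepB fdict (d, diff) gift).1 (giftStepB fdict (d, diff) gift).2 := by
  obtain ⟨glen, gxlen, dflen, rowlen, gxrowlen, graph_eq, diff_eq, keys_lt⟩ := inv
  have skip : ∀ (hA : giftStepA fdict (g, gx) gift = (g, gx))
      (hB : giftStepB fdict (d, diff) gift = (d, diff)),
      SyncInv n (giftStepA fdict (g, gx) gift).1 (giftStepA fdict (g, gx) gift).2
        (giftStepB fdict (d, diff) gift).1 (giftStepB fdict (d, diff) gift).2 := by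
    intro hA hB
    rw [hA, hB]
    exact ⟨glen, gxlen, dflen, rowlen, gxrowlen, graph_eq, diff_eq, keys_lt⟩
  cases hsp : PySem.Str.split? gift " " with
  | none => exact skip (by simp [giftStepA, hsp]) (by simp [giftStepB, hsp])
  | some parts =>
    match parts with
    | [] => exact skip (by simp [giftStepA, hsp]) (by simp [giftStepB, hsp])
    | [a] => exact skip (by simp [giftStepA, hsp]) (by simp [giftStepB, hsp])
    | a :: b :: c :: rest =>
      exact skip (by simp [giftStepA, hsp]) (by simp [giftStepB, hsp])
    | [a, b] =>
      cases ha : fdict.get? a with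
      | none => exact skip (by simp [giftStepA, hsp, ha]) (by simp [giftStepB, hsp, ha])
      | some ai =>
        cases hb : fdict.get? b with
        | none => exact skip (by simp [giftStepA, hsp, ha, hb]) (by simp [giftStepB, hsp, ha, hb])
        | some bi =>
          have hai : ai < n := hf a ai ha
          have hbi : bi < n := hf b bi hb
          have hga : ai < g.length := by omega
          have hrowa : (g.getD ai []).length = n := rowlen ai hai
          have hgxa : ai < gx.length := by omega
          have hra2 : (gx.getD ai []).length = 2 := gxrowlen ai hai
          have hgxb : bi < (gx.set ai ((gx.getD ai []).set 0 ((gx.getD ai []).getD 0 0 + 1))).length := by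
            rw [List.length_set]; omega
          have hrb2 : ((gx.set ai ((gx.getD ai []).set 0 ((gx.getD ai []).getD 0 0 + 1))).getD bi []).length = 2 := by
            rw [getD_set_split gx ai bi _ [] hgxa]
            split_ifs with h
            · rw [List.length_set]; exact hra2
            · exact gxrowlen bi hbi
          have hda : ai < diff.length := by omega
          have hdb : bi < (diff.set ai (diff.getD ai 0 + 1)).length := by
            rw [List.length_set]; omega
          simp only [giftStepA, giftStepB, hsp, ha, hb]
          refine ⟨by simp [glen], by simp [gxlen], by simp [dflen], ?_, ?_, ?_, ?_, ?_⟩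
          · -- rowlen
            intro i hi
            rw [getD_set_split g ai i _ [] hga]
            split_ifs with hia
            · rw [List.length_set]; exact hrowa
            · exact rowlen i hi
          · -- gxrowlen
            intro i hi
            rw [getD_set_split _ bi i _ [] hgxb]
            split_ifs with hib
            · rw [List.length_set]; exact hrb2
            · rw [getD_set_split gx ai i _ [] hgxa]
              split_ifs with hia
              · rw [List.length_set]; exact hra2
              · exact gxrowlen i hi
          · -- graph_eq
            intro i hi j hj
            rw [getD_set_split g ai i _ [] hga, PySem.Dict.getD_insert]
            by_cases hia : i = ai
            · rw [if_pos hia, getD_set_split _ bi j _ 0 (by rw [hrowa]; omega)]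
              by_cases hjb : j = bi
              · rw [if_pos hjb, if_pos (by rw [hia, hjb]), graph_eq ai hai bi hbi]
              · rw [if_neg hjb, if_neg (by simp [Prod.ext_iff, hjb]), hia, graph_eq ai hai j hj]
            · rw [if_neg hia, if_neg (by simp [Prod.ext_iff, hia])]
              exact graph_eq i hi j hj
          · -- diff_eq
            intro i hi
            rw [getD_set_split _ bi i _ [] hgxb,
              getD_set_split (diff.set ai (diff.getD ai 0 + 1)) bi i _ 0 hdb]
            by_cases hib : i = bi
            · rw [if_pos hib, if_pos hib, getD_set_ne _ 1 0 _ 0 (by omega),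
                getD_set_self _ 1 _ 0 (by rw [hrb2]; omega), getD_set_split gx ai bi _ [] hgxa]
              by_cases hba : bi = ai
              · rw [if_pos hba, getD_set_self _ 0 _ 0 (by omega), getD_set_ne _ 0 1 _ 0 (by omega),
                  getD_set_split diff ai bi _ 0 hda, if_pos hba]
                have := diff_eq ai hai
                omega
              · rw [if_neg hba, getD_set_split diff ai bi _ 0 hda, if_neg hba]
                have := diff_eq bi hbi
                omega
            · rw [if_neg hib, if_neg hib, getD_set_split gx ai i _ [] hgxa,
                getD_set_split diff ai i _ 0 hda]
              by_cases hia : i = ai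
              · rw [if_pos hia, if_pos hia, getD_set_self _ 0 _ 0 (by omega),
                  getD_set_ne _ 0 1 _ 0 (by omega)]
                have := diff_eq ai hai
                omega
              · rw [if_neg hia, if_neg hia]
                exact diff_eq i hi
          · -- keys_lt
            intro p hp
            rw [PySem.Dict.contains_insert] at hp
            rcases Bool.or_eq_true_iff.mp hp with h | h
            · have : p = (ai, bi) := by simpa using h
              rw [this]
              exact ⟨hai, hbi⟩
            · exact keys_lt p h

lemma inv_fold (n : Nat) (fdict : PySem.Dict String Nat)
    (hf : ∀ a i, fdict.get? a = some i → i < n) (gifts : List String) :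
    ∀ (g gx : List (List Int)) (d : PySem.Dict (Nat × Nat) Int) (diff : List Int)
    (_ : SyncInv n g gx d diff),
    SyncInv n (gifts.foldl (giftStepA fdict) (g, gx)).1 (gifts.foldl (giftStepA fdict) (g, gx)).2
      (gifts.foldl (giftStepB fdict) (d, diff)).1
      (gifts.foldl (giftStepB fdict) (d, diff)).2 := by
  induction gifts with
  | nil => intro g gx d diff inv; exact inv
  | cons gift rest ih =>
    intro g gx d diff inv
    have h := inv_step n fdict hf g gx d diff inv gift
    simpa using ih (giftStepA fdict (g, gx) gift).1 (giftStepA fdict (g, gx) gift).2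
      (giftStepB fdict (d, diff) gift).1 (giftStepB fdict (d, diff) gift).2 h

-- A's appended third entry gidx[2] is exactly B's net score
lemma appended_diff (n : Nat) (g gx : List (List Int)) (d : PySem.Dict (Nat × Nat) Int)
    (diff : List Int) (inv : SyncInv n g gx d diff) (i : Nat) (hi : i < n) :
    ((gx.map (fun r => r ++ [r.getD 0 0 - r.getD 1 0])).getD i []).getD 2 0 = diff.getD i 0 := by
  have hlen : i < gx.length := by have := inv.gxlen; omega
  have hmap : (gx.map (fun r => r ++ [r.getD 0 0 - r.getD 1 0])).getD i [] =
      gx[i] ++ [gx[i].getD 0 0 - gx[i].getD 1 0] := by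
    simp [List.getD_eq_getElem?_getD, hlen]
  have hgetD : gx.getD i [] = gx[i] := by
    simp [List.getD_eq_getElem?_getD, hlen]
  have h2 : gx[i].length = 2 := by rw [← hgetD]; exact inv.gxrowlen i hi
  obtain ⟨p, q, hpq⟩ := List.length_eq_two.mp h2
  have hd := inv.diff_eq i hi
  rw [hgetD, hpq] at hd
  rw [hmap, hpq]
  simp at hd ⊢
  omega

lemma trueWin_irrefl (d : PySem.Dict (Nat × Nat) Int) (diff : List Int) (i : Nat) :
    trueWin d diff i i = false := by simp [trueWin]

lemma diffWin_irrefl (diff : List Int) (i : Nat) : diffWin diff i i = false := by simp [diffWin]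

-- A's cnt for friend index i, in terms of B's data
lemma cntA_eq (n : Nat) (g gx : List (List Int)) (d : PySem.Dict (Nat × Nat) Int)
    (diff : List Int) (inv : SyncInv n g gx d diff) (i : Nat) (hi : i < n) :
    cntLoopA g (gx.map (fun r => r ++ [r.getD 0 0 - r.getD 1 0])) n i =
      ((List.range n).countP (trueWin d diff i) : Int) := by
  unfold cntLoopA
  rw [PySem.List.foldl_congr_mem (List.range n) _
    (fun cnt j => if trueWin d diff i j then cnt + 1 else cnt) 0 ?_,
    PySem.List.foldl_if_add_one]
  · ring
  · intro cnt j hj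
    have hjn : j < n := List.mem_range.mp hj
    by_cases hij : i = j
    · simp [hij, trueWin_irrefl]
    · have hgij := inv.graph_eq i hi j hjn
      have hgji := inv.graph_eq j hjn i hi
      have hdi := appended_diff n g gx d diff inv i hi
      have hdj := appended_diff n g gx d diff inv j hjn
      simp only [if_neg hij, hgij, hgji, hdi, hdj, trueWin]
      split_ifs <;> simp_all <;> omega

-- ---- the first-occurrence dict of B's sort ----

lemma firstFold_preserve (s : List Int) : ∀ (k : Nat) (d : PySem.Dict Int Nat) (v : Int),
    d.contains v = true →
    ((s.zipIdx k).foldl (fun d p => if d.contains p.1 then d else d.insert p.1 p.2) d).get? v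
      = d.get? v := by
  induction s with
  | nil => intro k d v _; rfl
  | cons x t ih =>
    intro k d v hc
    rw [List.zipIdx_cons, List.foldl_cons]
    by_cases hx : d.contains x
    · rw [if_pos hx]; exact ih (k+1) d v hc
    · rw [if_neg hx]
      have hxv : x ≠ v := fun h => hx (h ▸ hc)
      rw [ih (k+1) (d.insert x k) v (by rw [PySem.Dict.contains_insert, hc, Bool.or_true]),
        PySem.Dict.get?_insert_of_ne d k (fun h => hxv h.symm)]

lemma firstFold_sorted : ∀ (s : List Int), s.Pairwise (· ≤ ·) →
    ∀ (k : Nat) (d : PySem.Dict Int Nat) (v : Int), v ∈ s → d.contains v = false →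
    ((s.zipIdx k).foldl (fun d p => if d.contains p.1 then d else d.insert p.1 p.2) d).get? v
      = some (k + s.countP (fun x => decide (x < v))) := by
  intro s
  induction s with
  | nil => intro _ k d v hv; simp at hv
  | cons x t ih =>
    intro hs k d v hv hc
    rcases List.pairwise_cons.mp hs with ⟨hle, ht⟩
    rw [List.zipIdx_cons, List.foldl_cons]
    by_cases hxv : x = v
    · subst hxv
      rw [if_neg (by simp [hc]), firstFold_preserve t (k+1) (d.insert x k) x
        (PySem.Dict.contains_insert_self d x k), PySem.Dict.get?_insert_self]
      have h0 : t.countP (fun y => decide (y < x)) = 0 :=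
        List.countP_eq_zero.mpr (fun y hy => by simpa using not_lt.mpr (hle y hy))
      rw [List.countP_cons]
      simp [h0]
    · have hvt : v ∈ t := (List.mem_cons.mp hv).resolve_left (fun h => hxv h.symm)
      have hxlt : x < v := lt_of_le_of_ne (hle v hvt) hxv
      have step : (if d.contains x = true then d else d.insert x k).contains v = false := by
        split_ifs with h
        · exact hc
        · rw [PySem.Dict.contains_insert, hc]
          simpa using fun h' => hxv h'.symm
      have hrec := ih ht (k+1) (if d.contains x = true then d else d.insert x k) v hvt step
      rw [hrec, List.countP_cons]
      simp [hxlt]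
      omega

lemma first_getD (diff : List Int) (v : Int) (hv : v ∈ diff) :
    (firstDict (PySem.List.sorted diff (fun x => x) false)).getD v 0
      = diff.countP (fun x => decide (x < v)) := by
  have hperm := PySem.List.sorted_perm diff (fun x => x) false
  have hs : (PySem.List.sorted diff (fun x => x) false).Pairwise (· ≤ ·) :=
    PySem.List.sorted_pairwise diff (fun x => x)
  have hvs : v ∈ PySem.List.sorted diff (fun x => x) false := hperm.mem_iff.mpr hv
  have h := firstFold_sorted (PySem.List.sorted diff (fun x => x) false) hs 0
    PySem.Dict.empty v hvs (PySem.Dict.contains_empty v)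
  unfold firstDict
  rw [PySem.Dict.getD_eq_get?_getD, h]
  simp [hperm.countP_eq]

lemma countP_eq_range (l : List Int) (p : Int → Bool) :
    l.countP p = (List.range l.length).countP (fun j => p (l.getD j 0)) := by
  have hmap : (List.range l.length).map (fun j => l.getD j 0) = l := by
    apply List.ext_getElem (by simp)
    intro i h1 h2
    simp [List.getD_eq_getElem?_getD, List.getElem?_eq_getElem h2]
  conv_lhs => rw [← hmap]
  rw [List.countP_map]
  rfl

-- ---- the correction pass ----

lemma upd_length (w : List Int) (o : Option Nat) (v : Int) : (upd w o v).length = w.length := by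
  cases o <;> simp [upd]

lemma upd_getD (w : List Int) (o : Option Nat) (v : Int) (x : Nat)
    (ho : ∀ t, o = some t → t < w.length) :
    (upd w o v).getD x 0 = w.getD x 0 + (if o = some x then v else 0) := by
  cases o with
  | none => simp [upd]
  | some t =>
    have ht : t < w.length := ho t rfl
    rw [upd, getD_set_split w t x _ 0 ht]
    by_cases hx : x = t
    · subst hx; simp
    · have h' : ¬ t = x := fun h => hx h.symm
      simp [hx, h']

set_option maxHeartbeats 1000000 in
lemma corrStep_eq_upd (d : PySem.Dict (Nat × Nat) Int) (diff : List Int) (w : List Int)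
    (p : Nat × Nat) :
    corrStep d diff w p = upd (upd w (dCred diff p) (-1)) (tCred d diff p) 1 := by
  rcases p with ⟨i, j⟩
  simp only [corrStep, dCred, tCred, upd]
  split_ifs <;> first | rfl | omega

lemma corrStep_length (d : PySem.Dict (Nat × Nat) Int) (diff w : List Int) (p : Nat × Nat) :
    (corrStep d diff w p).length = w.length := by
  rw [corrStep_eq_upd, upd_length, upd_length]

lemma tCred_mem (d : PySem.Dict (Nat × Nat) Int) (diff : List Int) (p : Nat × Nat) (t : Nat)
    (h : tCred d diff p = some t) : t = p.1 ∨ t = p.2 := by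
  unfold tCred at h; split_ifs at h <;> simp_all

lemma dCred_mem (diff : List Int) (p : Nat × Nat) (t : Nat)
    (h : dCred diff p = some t) : t = p.1 ∨ t = p.2 := by
  unfold dCred at h; split_ifs at h <;> simp_all

lemma corrStep_getD (d : PySem.Dict (Nat × Nat) Int) (diff w : List Int) (p : Nat × Nat)
    (x : Nat) (h1 : p.1 < w.length) (h2 : p.2 < w.length) :
    (corrStep d diff w p).getD x 0 = w.getD x 0 + delta d diff x p := by
  rw [corrStep_eq_upd, upd_getD _ _ _ _ ?_, upd_getD _ _ _ _ ?_, delta]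
  · ring_nf
    split_ifs <;> ring
  · intro t ht; rcases dCred_mem diff p t ht with h | h <;> omega
  · intro t ht
    rw [upd_length]
    rcases tCred_mem d diff p t ht with h | h <;> omega

lemma foldl_corr_length (d : PySem.Dict (Nat × Nat) Int) (diff : List Int)
    (P : List (Nat × Nat)) : ∀ (w : List Int),
    (P.foldl (corrStep d diff) w).length = w.length := by
  induction P with
  | nil => intro w; rfl
  | cons p t ih => intro w; rw [List.foldl_cons, ih, corrStep_length]

lemma foldl_corr_getD (d : PySem.Dict (Nat × Nat) Int) (diff : List Int)
    (P : List (Nat × Nat)) : ∀ (w : List Int) (x : Nat)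
    (_ : ∀ p ∈ P, p.1 < w.length ∧ p.2 < w.length),
    (P.foldl (corrStep d diff) w).getD x 0 = w.getD x 0 + (P.map (delta d diff x)).sum := by
  induction P with
  | nil => intro w x _; simp
  | cons p t ih =>
    intro w x hb
    obtain ⟨hp1, hp2⟩ := hb p (by simp)
    rw [List.foldl_cons, List.map_cons, List.sum_cons,
      ih (corrStep d diff w p) x (fun q hq => by
        rw [corrStep_length]; exact hb q (by simp [hq])),
      corrStep_getD d diff w p x hp1 hp2]
    ring

lemma sum_map_eq_sum_filter {α : Type} (l : List α) (q : α → Bool) (g : α → Int)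
    (h : ∀ a ∈ l, q a = false → g a = 0) :
    (l.map g).sum = ((l.filter q).map g).sum := by
  induction l with
  | nil => rfl
  | cons a t ih =>
    rw [List.map_cons, List.sum_cons, List.filter_cons]
    by_cases hq : q a
    · rw [if_pos hq, List.map_cons, List.sum_cons,
        ih (fun b hb => h b (by simp [hb]))]
    · rw [if_neg hq, h a (by simp) (by simpa using hq),
        ih (fun b hb => h b (by simp [hb]))]
      simp

lemma sum_map_sub {α : Type} (l : List α) (f g : α → Int) :
    (l.map (fun x => f x - g x)).sum = (l.map f).sum - (l.map g).sum := by
  induction l with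
  | nil => simp
  | cons a t ih => simp [ih]; ring

-- credit goes to x in pair (x, j) / (j, x) exactly when x beats j
lemma tCred_fst_iff (d : PySem.Dict (Nat × Nat) Int) (diff : List Int) (x j : Nat) (hj : j ≠ x) :
    (tCred d diff (x, j) = some x) ↔ (trueWin d diff x j = true) := by
  unfold tCred trueWin
  split_ifs <;> simp_all

lemma tCred_snd_iff (d : PySem.Dict (Nat × Nat) Int) (diff : List Int) (x j : Nat) (hj : j ≠ x) :
    (tCred d diff (j, x) = some x) ↔ (trueWin d diff x j = true) := by
  unfold tCred trueWin
  split_ifs <;> simp_all <;> omega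

lemma dCred_fst_iff (diff : List Int) (x j : Nat) (hj : j ≠ x) :
    (dCred diff (x, j) = some x) ↔ (diffWin diff x j = true) := by
  unfold dCred diffWin
  split_ifs <;> simp_all

lemma dCred_snd_iff (diff : List Int) (x j : Nat) (hj : j ≠ x) :
    (dCred diff (j, x) = some x) ↔ (diffWin diff x j = true) := by
  unfold dCred diffWin
  split_ifs <;> simp_all <;> omega

-- credit for pair (x, j), j ≠ x, equals the plain win indicators
lemma delta_fst (d : PySem.Dict (Nat × Nat) Int) (diff : List Int) (x j : Nat) (hj : j ≠ x) :
    delta d diff x (x, j) =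
      (if trueWin d diff x j then (1 : Int) else 0) - (if diffWin diff x j then 1 else 0) := by
  simp only [delta, tCred_fst_iff d diff x j hj, dCred_fst_iff diff x j hj]

lemma delta_snd (d : PySem.Dict (Nat × Nat) Int) (diff : List Int) (x j : Nat) (hj : j ≠ x) :
    delta d diff x (j, x) =
      (if trueWin d diff x j then (1 : Int) else 0) - (if diffWin diff x j then 1 else 0) := by
  simp only [delta, tCred_snd_iff d diff x j hj, dCred_snd_iff diff x j hj]

lemma delta_self (d : PySem.Dict (Nat × Nat) Int) (diff : List Int) (x t : Nat) :
    delta d diff x (t, t) = 0 := by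
  unfold delta tCred dCred
  split_ifs <;> simp_all

lemma delta_other (d : PySem.Dict (Nat × Nat) Int) (diff : List Int) (x : Nat) (p : Nat × Nat)
    (h1 : p.1 ≠ x) (h2 : p.2 ≠ x) : delta d diff x p = 0 := by
  unfold delta
  have ht : ¬ tCred d diff p = some x := fun h => by
    rcases tCred_mem d diff p x h with h' | h' <;> simp_all
  have hd : ¬ dCred diff p = some x := fun h => by
    rcases dCred_mem diff p x h with h' | h' <;> simp_all
  simp [ht, hd]

-- the heart of the equivalence: corrections over the exchanged pairs turn the net-score
-- baseline into the true win count
lemma sum_delta_eq (d : PySem.Dict (Nat × Nat) Int) (diff : List Int) (n x : Nat) (hx : x < n)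
    (P : List (Nat × Nat)) (hnd : P.Nodup)
    (hnorm : ∀ p ∈ P, p.1 ≤ p.2 ∧ p.2 < n)
    (habs : ∀ j, j < n → j ≠ x → (min x j, max x j) ∉ P →
      d.getD (x, j) 0 = 0 ∧ d.getD (j, x) 0 = 0) :
    (P.map (delta d diff x)).sum =
      ((List.range n).countP (trueWin d diff x) : Int)
        - ((List.range n).countP (diffWin diff x) : Int) := by
  classical
  set g : Nat → Int := fun j =>
    (if trueWin d diff x j then (1 : Int) else 0) - (if diffWin diff x j then 1 else 0) with hg
  set M : List Nat := (List.range n).filter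
    (fun j => decide ((min x j, max x j) ∈ P) && decide (j ≠ x)) with hM
  -- RHS as a sum over M
  have hrhs : ((List.range n).countP (trueWin d diff x) : Int)
      - ((List.range n).countP (diffWin diff x) : Int) = (M.map g).sum := by
    rw [← PySem.List.sum_map_ite_one_zero (trueWin d diff x) (List.range n),
      ← PySem.List.sum_map_ite_one_zero (diffWin diff x) (List.range n),
      ← sum_map_sub]
    rw [hM]
    apply sum_map_eq_sum_filter
    intro j hj hq
    simp only [Bool.and_eq_false_iff, decide_eq_false_iff_not, not_not] at hq
    rcases hq with hq | hq
    · by_cases hjx : j = x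
      · subst hjx
        simp [hg, trueWin_irrefl, diffWin_irrefl]
      · obtain ⟨h1, h2⟩ := habs j (List.mem_range.mp hj) hjx hq
        simp only [trueWin, diffWin, h1, h2]
        split_ifs <;> simp_all <;> omega
    · subst hq
      simp [trueWin_irrefl, diffWin_irrefl]
  -- LHS as a sum over the pairs touching x
  have hlhs : (P.map (delta d diff x)).sum =
      ((P.filter (fun p => decide (p.1 = x ∨ p.2 = x) && decide (p.1 ≠ p.2))).map
        (delta d diff x)).sum := by
    apply sum_map_eq_sum_filter
    intro p hp hq
    simp only [Bool.and_eq_false_iff, decide_eq_false_iff_not, not_not, not_or] at hq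
    rcases hq with ⟨h1, h2⟩ | hq
    · exact delta_other d diff x p h1 h2
    · rcases p with ⟨p1, p2⟩
      cases hq
      exact delta_self d diff x p1
  -- the bijection between touching pairs and M
  have hperm : (P.filter (fun p => decide (p.1 = x ∨ p.2 = x) && decide (p.1 ≠ p.2))).Perm
      (M.map (fun j => (min x j, max x j))) := by
    apply (List.perm_ext_iff_of_nodup (hnd.filter _) ?_).mpr
    · intro p
      constructor
      · intro hp
        rcases List.mem_filter.mp hp with ⟨hpP, hq⟩
        simp only [Bool.and_eq_true, decide_eq_true_eq] at hq
        obtain ⟨hor, hne⟩ := hq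
        obtain ⟨hle, hlt⟩ := hnorm p hpP
        rcases hor with h1 | h2
        · -- p = (x, p.2), x < p.2
          have hxlt : x < p.2 := by omega
          refine List.mem_map.mpr ⟨p.2, ?_, ?_⟩
          · rw [hM]
            apply List.mem_filter.mpr
            refine ⟨List.mem_range.mpr hlt, ?_⟩
            have : (min x p.2, max x p.2) = p := by
              rcases p with ⟨p1, p2⟩
              simp only at h1 ⊢
              subst h1
              simp [Prod.ext_iff]
              omega
            simp [this, hpP]
            omega
          · rcases p with ⟨p1, p2⟩
            simp only at h1 ⊢
            subst h1
            simp [Prod.ext_iff]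
            omega
        · -- p = (p.1, x), p.1 < x
          have hxgt : p.1 < x := by omega
          refine List.mem_map.mpr ⟨p.1, ?_, ?_⟩
          · rw [hM]
            apply List.mem_filter.mpr
            refine ⟨List.mem_range.mpr (by omega), ?_⟩
            have : (min x p.1, max x p.1) = p := by
              rcases p with ⟨p1, p2⟩
              simp only at h2 ⊢
              subst h2
              simp [Prod.ext_iff]
              omega
            simp [this, hpP]
            omega
          · rcases p with ⟨p1, p2⟩
            simp only at h2 ⊢
            subst h2
            simp [Prod.ext_iff]
            omega
      · intro hp
        rcases List.mem_map.mp hp with ⟨j, hjM, rfl⟩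
        rw [hM] at hjM
        rcases List.mem_filter.mp hjM with ⟨hjr, hq⟩
        simp only [Bool.and_eq_true, decide_eq_true_eq] at hq
        obtain ⟨hmem, hne⟩ := hq
        apply List.mem_filter.mpr
        refine ⟨hmem, ?_⟩
        simp
        omega
    · apply List.Nodup.map_on ?_ (List.Nodup.filter _ (List.nodup_range))
      intro a ha b hb hab
      rcases List.mem_filter.mp ha with ⟨_, hqa⟩
      rcases List.mem_filter.mp hb with ⟨_, hqb⟩
      simp only [Bool.and_eq_true, decide_eq_true_eq] at hqa hqb
      have h1 : min x a = min x b := congrArg Prod.fst hab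
      have h2 : max x a = max x b := congrArg Prod.snd hab
      omega
  rw [hlhs, hrhs, List.Perm.sum_eq (hperm.map (delta d diff x)), List.map_map]
  apply congrArg List.sum
  apply List.map_congr_left
  intro j hjM
  rw [hM] at hjM
  rcases List.mem_filter.mp hjM with ⟨hjr, hq⟩
  simp only [Bool.and_eq_true, decide_eq_true_eq] at hq
  obtain ⟨_, hne⟩ := hq
  simp only [Function.comp]
  by_cases hlt : x < j
  · rw [show min x j = x by omega, show max x j = j by omega]
    exact delta_fst d diff x j hne
  · rw [show min x j = j by omega, show max x j = x by omega]
    exact delta_snd d diff x j hne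

lemma maxD_eq_foldl (l : List Int) (h : ∀ x ∈ l, 0 ≤ x) :
    PySem.List.maxD l (fun x => x) 0 = l.foldl max 0 := by
  cases l with
  | nil => rfl
  | cons x t =>
    have : PySem.List.maxD (x :: t) (fun y => y) 0 = ((PySem.List.max? (x :: t) (fun y => y)).getD 0) := rfl
    rw [this, PySem.List.max?_id_cons]
    have hx : max 0 x = x := by have := h x (by simp); omega
    simp [List.foldl_cons, hx]

lemma foldl_fixed {α β : Type} (f : β → α → β) (l : List α) (c : β)
    (h : ∀ c x, x ∈ l → f c x = c) : l.foldl f c = c := by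
  induction l generalizing c with
  | nil => rfl
  | cons x t ih =>
    rw [List.foldl_cons, h c x (by simp)]
    exact ih c (fun c x hx => h c x (by simp [hx]))

lemma foldl_max_zero (l : List Int) (h : ∀ x ∈ l, x = 0) : l.foldl max 0 = 0 := by
  induction l with
  | nil => rfl
  | cons x t ih =>
    rw [List.foldl_cons, h x (by simp), max_self]
    exact ih (fun x hx => h x (by simp [hx]))

-- main equivalence on duplicate-free friends, any gifts (malformed gifts skip in both ports alike)
theorem solution_eq_alt (friends gifts : List String) (hnd : friends.Nodup) :
    solution friends gifts = solution_alt friends gifts := by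
  simp only [solution, solution_alt]
  have hf : ∀ a i, (buildIdx friends).get? a = some i → i < friends.length :=
    fun a i h => buildIdx_get_lt friends a i h
  have inv := inv_fold friends.length (buildIdx friends) hf gifts
    (List.replicate friends.length (List.replicate friends.length (0 : Int)))
    (List.replicate friends.length [0, 0]) PySem.Dict.empty
    (List.replicate friends.length (0 : Int)) (inv_init friends.length)
  set stA := gifts.foldl (giftStepA (buildIdx friends))
    (List.replicate friends.length (List.replicate friends.length (0 : Int)),
     List.replicate friends.length [0, 0]) with hsa
  set stB := gifts.foldl (giftStepB (buildIdx friends))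
    ((PySem.Dict.empty : PySem.Dict (Nat × Nat) Int),
     List.replicate friends.length (0 : Int)) with hsb
  set n := friends.length with hn
  set F := fun x : Nat => ((List.range n).countP (trueWin stB.1 stB.2 x) : Int) with hF
  -- A's answer loop is the running max of F over 0..n-1
  have hA : friends.foldl (fun answer friend =>
      max answer (cntLoopA stA.1 (stA.2.map (fun g => g ++ [g.getD 0 0 - g.getD 1 0])) n
        ((buildIdx friends).getD friend 0))) 0 =
      ((List.range n).map F).foldl max 0 := by
    rw [← List.foldl_map (f := fun friend => cntLoopA stA.1
      (stA.2.map (fun g => g ++ [g.getD 0 0 - g.getD 1 0])) n ((buildIdx friends).getD friend 0))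
      (g := max)]
    congr 1
    apply List.ext_getElem (by simp [hn])
    intro k h1 h2
    simp only [List.getElem_map, List.getElem_range]
    rw [buildIdx_getD_self friends hnd k (by simpa using h1)]
    rw [cntA_eq n stA.1 stA.2 stB.1 stB.2 inv k (by simpa [hn] using h1)]
  rw [hA]
  -- B's corrected wins list is the map of F over 0..n-1
  set P := PySem.Set.ofList (stB.1.keys.map (fun p => (min p.1 p.2, max p.1 p.2))) with hP
  have hPnodup : P.Nodup := PySem.Set.nodup_ofList _
  have hPnorm : ∀ p ∈ P, p.1 ≤ p.2 ∧ p.2 < n := by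
    intro p hp
    rw [hP] at hp
    rcases List.mem_map.mp ((PySem.Set.mem_ofList _ _).mp hp) with ⟨k, hk, rfl⟩
    have hc : stB.1.contains k = true := (PySem.Dict.contains_iff_mem_keys _ _).mpr hk
    obtain ⟨h1, h2⟩ := inv.keys_lt k hc
    refine ⟨?_, ?_⟩ <;> dsimp only <;> omega
  have habs0 : ∀ k : Nat × Nat, (min k.1 k.2, max k.1 k.2) ∉ P → stB.1.getD k 0 = 0 := by
    intro k hk
    by_cases hc : stB.1.contains k = true
    · exfalso
      apply hk
      rw [hP]
      apply (PySem.Set.mem_ofList _ _).mpr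
      exact List.mem_map_of_mem ((PySem.Dict.contains_iff_mem_keys _ _).mp hc)
    · have hc' : stB.1.contains k = false := by simpa using hc
      exact PySem.Dict.getD_of_not_contains stB.1 0 hc'
  have habs : ∀ x, x < n → ∀ j, j < n → j ≠ x → (min x j, max x j) ∉ P →
      stB.1.getD (x, j) 0 = 0 ∧ stB.1.getD (j, x) 0 = 0 := by
    intro x hx j hj hjx hmem
    constructor
    · exact habs0 (x, j) hmem
    · apply habs0 (j, x)
      simpa [Nat.min_comm, Nat.max_comm] using hmem
  set wins0 := stB.2.map (fun v =>
    (((firstDict (PySem.List.sorted stB.2 (fun x => x) false)).getD v 0 : Nat) : Int)) with hw0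
  have hlen2 : stB.2.length = n := inv.dflen
  have hw0len : wins0.length = n := by rw [hw0, List.length_map, hlen2]
  have hbase : ∀ x, x < n → wins0.getD x 0 = ((List.range n).countP (diffWin stB.2 x) : Int) := by
    intro x hx
    have hxl : x < stB.2.length := by omega
    have hmapx : wins0.getD x 0 =
        (((firstDict (PySem.List.sorted stB.2 (fun x => x) false)).getD (stB.2.getD x 0) 0 : Nat) : Int) := by
      rw [hw0]
      simp [List.getD_eq_getElem?_getD, List.getElem?_eq_getElem hxl]
    have hvmem : stB.2.getD x 0 ∈ stB.2 := by
      have : stB.2.getD x 0 = stB.2[x] := by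
        simp [List.getD_eq_getElem?_getD, List.getElem?_eq_getElem hxl]
      rw [this]
      exact List.getElem_mem hxl
    rw [hmapx, first_getD stB.2 (stB.2.getD x 0) hvmem, countP_eq_range, hlen2]
    rfl
  have hwins : P.foldl (corrStep stB.1 stB.2) wins0 = (List.range n).map F := by
    apply List.ext_getElem (by rw [foldl_corr_length, hw0len]; simp)
    intro x h1 h2
    have hxn : x < n := by rw [foldl_corr_length, hw0len] at h1; omega
    have hgd : (P.foldl (corrStep stB.1 stB.2) wins0)[x] =
        (P.foldl (corrStep stB.1 stB.2) wins0).getD x 0 := by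
      simp [List.getD_eq_getElem?_getD, List.getElem?_eq_getElem h1]
    rw [hgd, foldl_corr_getD stB.1 stB.2 P wins0 x
        (fun p hp => by obtain ⟨hle, hlt⟩ := hPnorm p hp; rw [hw0len]; omega),
      hbase x hxn,
      sum_delta_eq stB.1 stB.2 n x hxn P hPnodup hPnorm (habs x hxn)]
    simp only [List.getElem_map, List.getElem_range, hF]
    ring
  rw [hwins]
  have hnonneg : ∀ x ∈ (List.range n).map F, 0 ≤ x := by
    intro x hx
    rcases List.mem_map.mp hx with ⟨k, _, rfl⟩
    rw [hF]
    positivity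
  rw [maxD_eq_foldl _ hnonneg]

-- with no gifts everything ties at zero and both sides return 0, whatever friends looks like
theorem solution_empty (friends : List String) :
    solution friends [] = solution_alt friends [] := by
  simp only [solution, solution_alt, List.foldl_nil]
  have hz : ∀ i : Nat, (List.replicate friends.length (0 : Int)).getD i 0 = 0 := by
    intro i; rw [getD_replicate']; split_ifs <;> rfl
  have hg : ∀ p q : Nat,
      ((List.replicate friends.length (List.replicate friends.length (0 : Int))).getD p []).getD q 0 = 0 := by
    intro p q
    rw [getD_replicate']
    split_ifs
    · exact hz q
    · rfl
  have hx : ∀ p : Nat,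
      (((List.replicate friends.length [0, 0]).map
        (fun g => g ++ [g.getD 0 0 - g.getD 1 0])).getD p []).getD 2 0 = 0 := by
    intro p
    rw [List.map_replicate, getD_replicate']
    split_ifs <;> rfl
  have hcnt : ∀ i : Nat,
      cntLoopA (List.replicate friends.length (List.replicate friends.length (0 : Int)))
        ((List.replicate friends.length [0, 0]).map (fun g => g ++ [g.getD 0 0 - g.getD 1 0]))
        friends.length i = 0 := by
    intro i
    unfold cntLoopA
    apply foldl_fixed
    intro cnt j _
    dsimp only
    by_cases hij : i = j
    · rw [if_pos hij]
    · rw [if_neg hij]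
      simp only [hg]
      norm_num [List.getElem?_replicate]
      split_ifs <;> simp
  have hA : ∀ (l : List String) (a : Int), 0 ≤ a →
      l.foldl (fun answer friend =>
        max answer (cntLoopA (List.replicate friends.length (List.replicate friends.length (0 : Int)))
          ((List.replicate friends.length [0, 0]).map (fun g => g ++ [g.getD 0 0 - g.getD 1 0]))
          friends.length ((buildIdx friends).getD friend 0))) a = a := by
    intro l
    induction l with
    | nil => intro a _; rfl
    | cons f t ih =>
      intro a ha
      rw [List.foldl_cons, hcnt ((buildIdx friends).getD f 0), max_eq_left ha]
      exact ih a ha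
  rw [hA friends 0 le_rfl]
  -- B side: empty dict, all-zero net scores
  have hkeys : (PySem.Dict.empty : PySem.Dict (Nat × Nat) Int).keys = [] := by
    simp [PySem.Dict.keys_empty]
  rw [hkeys]
  simp only [List.map_nil]
  have hP : PySem.Set.ofList ([] : List (Nat × Nat)) = [] := rfl
  rw [hP, List.foldl_nil]
  cases hn0 : friends.length with
  | zero =>
    simp [List.replicate]
  | succ m =>
    have hmem0 : (0 : Int) ∈ List.replicate (m + 1) (0 : Int) := by simp
    have hcount : (List.replicate (m + 1) (0 : Int)).countP (fun x => decide (x < 0)) = 0 :=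
      List.countP_eq_zero.mpr (fun y hy => by
        rw [List.eq_of_mem_replicate hy]; simp)
    rw [List.map_replicate, first_getD (List.replicate (m + 1) (0 : Int)) 0 hmem0, hcount]
    rw [maxD_eq_foldl _ (fun x hx => by rw [List.eq_of_mem_replicate hx]; simp),
      foldl_max_zero _ (fun x hx => by rw [List.eq_of_mem_replicate hx]; simp)]

-- ===== VERDICT (by name: the statement is the Claim_ definition above) =====
theorem solution_spec : Claim_equal_solution := by
  intro friends gifts _hdom hpre
  unfold Spec_solution
  rcases hpre.1 with hempty | hnd
  · rw [hempty]
    exact solution_empty friends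
  · exact solution_eq_alt friends gifts hnd
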